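-- pv_equiv track=rewrite | github.com/Wanderkind/TreeBuilder | ToolsForPolynomialsAnd812.py | shr
-- ===== SOURCE A (Python) =====
-- def add(a, b):
--
--     A = len(a)
--     B = len(b)
--     ans=[]
--
--     if A<B:
--         a = [0 for _ in range(B-A)]+a
--     else:
--         b = [0 for _ in range(A-B)]+b
--
--     for i in range(max(A,B)):
--         ans.append(a[-i-1]+b[-i-1])
--
--     return ans[::-1]
--
-- def shr(a, b): # assumes that b is monic
--
--     A = len(a)
--     B = len(b)
--     ans=[]
--
--     c = a[:B]
--     for i in range(A-B+1):
--         k = c[i]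
--         ans.append(k)
--         c = add(c, [-k*j for j in b])
--         if i<A-B:
--             c += [a[B+i]]
--
--     return ans
-- ===== SOURCE B (Python) =====
-- def shr(a, b):  # assumes that b is monic
--     A = len(a)
--     B = len(b)
--     r = list(a)
--     ans = []
--     for i in range(A - B + 1):
--         k = r[i]
--         ans.append(k)
--         for j in range(1, B):
--             r[i + j] -= k * b[j]
--     return ans
-- ===== Notes on version B (the rewrite author's own statement) =====
-- stated objective: faster
-- what changed: B does classic in-place synthetic division: it mutates one working array of length len(a), subtracting k*b[j] only over the divisor-sized window, instead of A's per-step rebuild of the remainder list via add() with padding, a full-length comprehension and a reversal.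
import Mathlib
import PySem

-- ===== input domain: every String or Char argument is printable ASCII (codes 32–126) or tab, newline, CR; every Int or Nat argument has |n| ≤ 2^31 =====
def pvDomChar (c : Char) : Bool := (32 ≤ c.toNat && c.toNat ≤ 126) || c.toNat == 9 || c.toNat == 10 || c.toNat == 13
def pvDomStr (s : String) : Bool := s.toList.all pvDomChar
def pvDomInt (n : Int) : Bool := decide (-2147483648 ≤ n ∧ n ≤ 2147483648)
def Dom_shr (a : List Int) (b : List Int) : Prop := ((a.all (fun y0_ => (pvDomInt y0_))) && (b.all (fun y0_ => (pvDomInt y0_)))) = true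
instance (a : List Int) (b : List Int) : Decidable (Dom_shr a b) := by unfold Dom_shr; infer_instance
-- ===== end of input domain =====

-- B replaces A's per-step list rebuild (add with padding + reversal) by in-place synthetic
-- division on one working array, updating only the divisor-sized window (return value only).

-- ===== PORT A =====
-- helper add(a, b) of A, literal
def pyadd (a : List Int) (b : List Int) : List Int :=
  let A := a.length
  let B := b.length
  let a2 := if A < B then List.replicate (B - A) (0 : Int) ++ a else a
  let b2 := if A < B then b else List.replicate (A - B) (0 : Int) ++ b
  let ans := (PySem.List.pyRange 0 ((max A B : Nat) : Int) 1).foldl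
    (fun ans i => ans ++ [PySem.List.pyGetD a2 (-i - 1) 0 + PySem.List.pyGetD b2 (-i - 1) 0])
    ([] : List Int)
  ans.reverse  -- ans[::-1] (PySem.List.slice?_none_none_neg_one)

def shr (a : List Int) (b : List Int) : List Int :=
  let A := a.length
  let B := b.length
  let st := (PySem.List.pyRange 0 ((A : Int) - (B : Int) + 1) 1).foldl
    (fun (st : List Int × List Int) i =>
      let ans := st.1
      let c := st.2
      let k := PySem.List.pyGetD c i 0
      let ans := ans ++ [k]
      let c := pyadd c (b.map (fun j => -k * j))
      let c := if i < (A : Int) - (B : Int) then c ++ [PySem.List.pyGetD a ((B : Int) + i) 0] else c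
      (ans, c))
    (([] : List Int), PySem.List.slice a none (some (B : Int)))
  st.1

-- ===== PORT B =====
def shr_alt (a : List Int) (b : List Int) : List Int :=
  let A := a.length
  let B := b.length
  let st := (PySem.List.pyRange 0 ((A : Int) - (B : Int) + 1) 1).foldl
    (fun (st : List Int × List Int) i =>
      let ans := st.1
      let r := st.2
      let k := PySem.List.pyGetD r i 0
      let ans := ans ++ [k]
      let r := (PySem.List.pyRange 1 (B : Int) 1).foldl
        (fun r j => PySem.List.pySetD r (i + j)
          (PySem.List.pyGetD r (i + j) 0 - k * PySem.List.pyGetD b j 0)) r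
      (ans, r))
    (([] : List Int), a)
  st.1

-- ===== PRECONDITION & SPEC =====
-- Pre_ excludes exactly b = [], where the Python A raises IndexError (k = c[i] on the empty c).
def Pre_shr (a : List Int) (b : List Int) : Prop := b ≠ []
instance (a : List Int) (b : List Int) : Decidable (Pre_shr a b) := by unfold Pre_shr; infer_instance
def pvWitness_shr : List Int × List Int := ([1, 2, 3], [1, 1])
def Spec_shr (a : List Int) (b : List Int) (out : List Int) : Prop := out = shr_alt a b
instance (a : List Int) (b : List Int) (out : List Int) : Decidable (Spec_shr a b out) := by unfold Spec_shr; infer_instance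

-- ===== CLAIM (what is proved, stated in full; the proofs are below) =====
def Claim_equal_shr : Prop := ∀ (a : List Int) (b : List Int), Dom_shr a b → Pre_shr a b → Spec_shr a b (shr a b)

-- ===== LEMMAS AND PROOFS =====

-- step function of A's loop, named for the proofs (definitionally the body of shr's fold)
def stepA (a : List Int) (b : List Int) : (List Int × List Int) → Int → (List Int × List Int) :=
  fun st i =>
    let ans := st.1
    let c := st.2
    let k := PySem.List.pyGetD c i 0
    let ans := ans ++ [k]
    let c := pyadd c (b.map (fun j => -k * j))
    let c := if i < (a.length : Int) - (b.length : Int) then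
        c ++ [PySem.List.pyGetD a ((b.length : Int) + i) 0] else c
    (ans, c)

-- step function of B's loop
def stepB (a : List Int) (b : List Int) : (List Int × List Int) → Int → (List Int × List Int) :=
  fun st i =>
    let ans := st.1
    let r := st.2
    let k := PySem.List.pyGetD r i 0
    let ans := ans ++ [k]
    let r := (PySem.List.pyRange 1 (b.length : Int) 1).foldl
      (fun r j => PySem.List.pySetD r (i + j)
        (PySem.List.pyGetD r (i + j) 0 - k * PySem.List.pyGetD b j 0)) r
    (ans, r)

lemma shr_eq_fold (a b : List Int) :
    shr a b = ((PySem.List.pyRange 0 ((a.length : Int) - (b.length : Int) + 1) 1).foldl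
      (stepA a b) (([] : List Int), PySem.List.slice a none (some (b.length : Int)))).1 := rfl

lemma shr_alt_eq_fold (a b : List Int) :
    shr_alt a b = ((PySem.List.pyRange 0 ((a.length : Int) - (b.length : Int) + 1) 1).foldl
      (stepB a b) (([] : List Int), a)).1 := rfl

-- the relational invariant between A's remainder list c and B's working array r before step i
def shrInv (a b : List Int) (i : Nat) (c r : List Int) : Prop :=
  c.length = b.length + i ∧ r.length = a.length ∧
  (∀ p : Nat, i ≤ p → p < b.length + i → c.getD p 0 = r.getD p 0) ∧
  (∀ p : Nat, b.length + i ≤ p → p < a.length → r.getD p 0 = a.getD p 0)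

-- B's inner loop: length is preserved
lemma inner_len (b : List Int) (i : Nat) (k : Int) : ∀ (s : Nat) (r : List Int),
    ((PySem.List.pyRange (s : Int) (b.length : Int) 1).foldl
      (fun r j => PySem.List.pySetD r ((i : Nat) + j)
        (PySem.List.pyGetD r ((i : Nat) + j) 0 - k * PySem.List.pyGetD b j 0)) r).length
    = r.length := by
  have key : ∀ (t s : Nat) (r : List Int), b.length ≤ s + t →
      ((PySem.List.pyRange (s : Int) (b.length : Int) 1).foldl
        (fun r j => PySem.List.pySetD r ((i : Nat) + j)
          (PySem.List.pyGetD r ((i : Nat) + j) 0 - k * PySem.List.pyGetD b j 0)) r).length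
      = r.length := by
    intro t
    induction t with
    | zero =>
      intro s r h
      rw [PySem.List.pyRange_one_eq_nil (by exact_mod_cast h : (b.length : Int) ≤ (s : Int))]
      rfl
    | succ t ih =>
      intro s r h
      by_cases hs : s < b.length
      · rw [PySem.List.pyRange_one_cons (by exact_mod_cast hs : (s : Int) < (b.length : Int))]
        simp only [List.foldl_cons]
        rw [show ((s : Int) + 1) = ((s + 1 : Nat) : Int) by push_cast; ring]
        rw [ih (s + 1) _ (by omega)]
        rw [show ((i : Int) + (s : Int)) = ((i + s : Nat) : Int) by push_cast; ring]
        rw [PySem.List.pySetD_natCast]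
        exact List.length_set ..
      · rw [PySem.List.pyRange_one_eq_nil
          (by exact_mod_cast Nat.le_of_not_lt hs : (b.length : Int) ≤ (s : Int))]
        rfl
  intro s r
  exact key (b.length - s) s r (by omega)

-- B's inner loop, pointwise: positions i+s … i+B-1 get r[p] - k*b[p-i], others unchanged
lemma inner_get (b : List Int) (i : Nat) (k : Int) : ∀ (s : Nat) (r : List Int),
    1 ≤ s → i + b.length ≤ r.length → ∀ p : Nat,
    ((PySem.List.pyRange (s : Int) (b.length : Int) 1).foldl
      (fun r j => PySem.List.pySetD r ((i : Nat) + j)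
        (PySem.List.pyGetD r ((i : Nat) + j) 0 - k * PySem.List.pyGetD b j 0)) r).getD p 0
    = if i + s ≤ p ∧ p < i + b.length then r.getD p 0 - k * b.getD (p - i) 0 else r.getD p 0 := by
  have key : ∀ (t s : Nat) (r : List Int), 1 ≤ s → b.length ≤ s + t → i + b.length ≤ r.length →
      ∀ p : Nat,
      ((PySem.List.pyRange (s : Int) (b.length : Int) 1).foldl
        (fun r j => PySem.List.pySetD r ((i : Nat) + j)
          (PySem.List.pyGetD r ((i : Nat) + j) 0 - k * PySem.List.pyGetD b j 0)) r).getD p 0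
      = if i + s ≤ p ∧ p < i + b.length then r.getD p 0 - k * b.getD (p - i) 0
        else r.getD p 0 := by
    intro t
    induction t with
    | zero =>
      intro s r hs hlen hr p
      rw [PySem.List.pyRange_one_eq_nil (by exact_mod_cast hlen : (b.length : Int) ≤ (s : Int))]
      simp only [List.foldl_nil]
      split_ifs with h
      · omega
      · rfl
    | succ t ih =>
      intro s r hs hlen hr p
      by_cases hsB : s < b.length
      · rw [PySem.List.pyRange_one_cons (by exact_mod_cast hsB : (s : Int) < (b.length : Int))]
        simp only [List.foldl_cons]
        rw [show ((s : Int) + 1) = ((s + 1 : Nat) : Int) by push_cast; ring]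
        rw [show ((i : Int) + (s : Int)) = ((i + s : Nat) : Int) by push_cast; ring]
        rw [PySem.List.pyGetD_natCast, PySem.List.pyGetD_natCast, PySem.List.pySetD_natCast]
        rw [ih (s + 1) _ (by omega) (by omega) (by rw [List.length_set]; omega) p]
        have hset : ∀ q : Nat, (r.set (i + s)
            (r.getD (i + s) 0 - k * b.getD s 0)).getD q 0
            = if q = i + s then r.getD (i + s) 0 - k * b.getD s 0 else r.getD q 0 := by
          intro q
          simp only [List.getD_eq_getElem?_getD, List.getElem?_set]
          split_ifs with h1 h2 h2 <;> simp_all <;> omega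
        rw [hset p]
        by_cases hp : p = i + s
        · subst hp
          have : i + s - i = s := by omega
          simp only [this]
          split_ifs with h1 h2 <;> first | rfl | omega
        · split_ifs with h1 h2 h2 <;> first | rfl | omega
      · rw [PySem.List.pyRange_one_eq_nil
          (by exact_mod_cast Nat.le_of_not_lt hsB : (b.length : Int) ≤ (s : Int))]
        simp only [List.foldl_nil]
        split_ifs with h
        · omega
        · rfl
  intro s r hs hr p
  exact key (b.length - s) s r hs (by omega) hr p

-- A's helper add, as a zipWith after right-alignment padding
lemma pyadd_spec (c d : List Int) (h : d.length ≤ c.length) :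
    pyadd c d = List.zipWith (· + ·) c (List.replicate (c.length - d.length) 0 ++ d) := by
  have hlt : ¬ (c.length < d.length) := by omega
  have hmax : max c.length d.length = c.length := Nat.max_eq_left h
  have hlenE : (List.replicate (c.length - d.length) (0 : Int) ++ d).length = c.length := by
    simp; omega
  simp only [pyadd, if_neg hlt, hmax, PySem.List.foldl_append_singleton_eq_map,
    List.nil_append]
  apply List.ext_getElem
  · simp [PySem.List.length_pyRange_one, hlenE]
  · intro n h1 h2
    simp only [List.length_reverse, List.length_map, PySem.List.length_pyRange_one,
      sub_zero, Int.toNat_natCast] at h1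
    rw [List.getElem_reverse, List.getElem_map, PySem.List.getElem_pyRange_one]
    simp only [List.length_map, PySem.List.length_pyRange_one, sub_zero,
      Int.toNat_natCast, zero_add]
    have hn : n < c.length := by
      rw [List.length_zipWith, hlenE] at h2
      omega
    have h1c : ((((c.length - 1 - n : Nat)) : Int)) = (((c.length - n : Nat)) : Int) - 1 := by
      push_cast [hn]
      omega
    have h2c : ∀ (xs : List Int), xs.length = c.length →
        PySem.List.pyGetD xs (-(((c.length - 1 - n : Nat)) : Int) - 1) 0 = xs.getD n 0 := by
      intro xs hxs
      rw [show (-(((c.length - 1 - n : Nat)) : Int) - 1) = -(((c.length - n : Nat)) : Int) by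
        rw [h1c]; ring]
      rw [PySem.List.pyGetD_neg_natCast xs (c.length - n) 0 (by omega) (by omega)]
      rw [List.getD_eq_getElem xs 0 (by omega)]
      congr 1
      omega
    rw [h2c c rfl, h2c _ hlenE, List.getElem_zipWith]
    congr 1 <;> rw [List.getD_eq_getElem _ 0 (by omega)]

lemma pyadd_len (c d : List Int) (h : d.length ≤ c.length) : (pyadd c d).length = c.length := by
  rw [pyadd_spec c d h, List.length_zipWith, List.length_append, List.length_replicate]
  omega

lemma pyadd_getD (c d : List Int) (h : d.length ≤ c.length) (p : Nat) :
    (pyadd c d).getD p 0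
    = c.getD p 0 + (List.replicate (c.length - d.length) (0 : Int) ++ d).getD p 0 := by
  have hlenE : (List.replicate (c.length - d.length) (0 : Int) ++ d).length = c.length := by
    simp
    omega
  rw [pyadd_spec c d h]
  by_cases hp : p < c.length
  · rw [List.getD_eq_getElem _ 0 (by rw [List.length_zipWith]; omega),
      List.getD_eq_getElem _ 0 hp, List.getD_eq_getElem _ 0 (by omega),
      List.getElem_zipWith]
  · rw [List.getD_eq_default _ 0 (by rw [List.length_zipWith]; omega),
      List.getD_eq_default _ 0 (by omega), List.getD_eq_default _ 0 (by omega)]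
    ring

-- main loop correspondence
lemma loop (a b : List Int) (hb : b ≠ []) : ∀ (t i : Nat) (q c r : List Int),
    (i : Int) + t = (a.length : Int) - (b.length : Int) + 1 →
    (1 ≤ t → shrInv a b i c r) →
    ((PySem.List.pyRange (i : Int) ((a.length : Int) - (b.length : Int) + 1) 1).foldl
      (stepA a b) (q, c)).1
    = ((PySem.List.pyRange (i : Int) ((a.length : Int) - (b.length : Int) + 1) 1).foldl
      (stepB a b) (q, r)).1 := by
  have hB : 0 < b.length := List.length_pos_iff.mpr hb
  intro t
  induction t with
  | zero =>
    intro i q c r h0 _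
    rw [PySem.List.pyRange_one_eq_nil (by omega)]
    rfl
  | succ t ih =>
    intro i q c r h hinv
    obtain ⟨hc, hr, hcr, hra⟩ := hinv (by omega)
    have hiA : i + b.length ≤ a.length := by omega
    rw [PySem.List.pyRange_one_cons (by omega)]
    simp only [List.foldl_cons, stepA, stepB]
    rw [show ((i : Int) + 1) = ((i + 1 : Nat) : Int) by push_cast; ring]
    simp only [PySem.List.pyGetD_natCast]
    have hk : c.getD i 0 = r.getD i 0 := hcr i le_rfl (by omega)
    rw [hk]
    set k := r.getD i 0 with hkdef
    set d := b.map (fun j => -k * j) with hddef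
    have hd : d.length = b.length := by simp [hddef]
    have hd' : d.length ≤ c.length := by omega
    set rNew := (PySem.List.pyRange 1 (b.length : Int) 1).foldl
      (fun r j => PySem.List.pySetD r ((i : Int) + j)
        (PySem.List.pyGetD r ((i : Int) + j) 0 - k * PySem.List.pyGetD b j 0)) r with hrNew
    have hlen2 : rNew.length = r.length := by
      have := inner_len b i k 1 r
      simpa using this
    have hget2 : ∀ p : Nat, rNew.getD p 0
        = if i + 1 ≤ p ∧ p < i + b.length then r.getD p 0 - k * b.getD (p - i) 0
          else r.getD p 0 := by
      intro p
      have := inner_get b i k 1 r (le_refl 1) (by omega) p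
      simpa using this
    apply ih (i + 1) _ _ rNew (by push_cast; push_cast at h; omega)
    intro ht
    have hiAB : (i : Int) < (a.length : Int) - (b.length : Int) := by omega
    rw [if_pos hiAB]
    have hw : PySem.List.pyGetD a ((b.length : Int) + (i : Int)) 0 = a.getD (b.length + i) 0 := by
      rw [show ((b.length : Int) + (i : Int)) = ((b.length + i : Nat) : Int) by push_cast; ring,
        PySem.List.pyGetD_natCast]
    have hpl : (pyadd c d).length = b.length + i := by rw [pyadd_len c d hd', hc]
    refine ⟨?_, ?_, ?_, ?_⟩
    · rw [List.length_append, hpl]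
      simp only [List.length_cons, List.length_nil]
      omega
    · rw [hlen2, hr]
    · intro p hp1 hp2
      by_cases hp : p < b.length + i
      · rw [List.getD_append _ _ _ _ (by omega)]
        rw [pyadd_getD c d hd' p]
        have hcd : c.length - d.length = i := by omega
        have hpad : (List.replicate (c.length - d.length) (0 : Int) ++ d).getD p 0
            = d.getD (p - i) 0 := by
          rw [List.getD_append_right _ _ _ _ (by rw [List.length_replicate, hcd]; omega)]
          rw [List.length_replicate, hcd]
        rw [hpad, hddef]
        rw [hcr p (by omega) (by omega)]
        rw [List.getD_eq_getElem (List.map (fun j => -k * j) b) 0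
          (by rw [List.length_map]; omega), List.getElem_map]
        rw [hget2 p, if_pos (by omega)]
        rw [List.getD_eq_getElem b 0 (by omega)]
        ring
      · have hpB : p = b.length + i := by omega
        subst hpB
        rw [List.getD_append_right _ _ _ _ (by omega)]
        rw [hpl, hw]
        simp only [Nat.sub_self]
        rw [hget2 _, if_neg (by omega)]
        rw [hra _ (by omega) (by omega)]
        rfl
    · intro p hp1 hp2
      rw [hget2 p, if_neg (by omega)]
      exact hra p (by omega) hp2

-- ===== VERDICT (by name: the statement is the Claim_ definition above) =====
theorem shr_spec : Claim_equal_shr := by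
  intro a b _ hpre
  unfold Spec_shr
  rw [shr_eq_fold, shr_alt_eq_fold]
  have hB : 0 < b.length := List.length_pos_iff.mpr hpre
  by_cases hBA : b.length ≤ a.length
  · have hinit : shrInv a b 0 (PySem.List.slice a none (some (b.length : Int))) a := by
      rw [PySem.List.slice_to_natCast]
      refine ⟨by rw [List.length_take]; omega, rfl, ?_, fun p _ _ => rfl⟩
      intro p _ hp
      rw [List.getD_eq_getElem _ 0 (by rw [List.length_take]; omega),
        List.getElem_take, List.getD_eq_getElem a 0 (by omega)]
    have := loop a b hpre (a.length - b.length + 1) 0 []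
      (PySem.List.slice a none (some (b.length : Int))) a
      (by push_cast; omega) (fun _ => hinit)
    simpa using this
  · rw [PySem.List.pyRange_one_eq_nil (by omega)]
    rfl
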